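-- pv_equiv track=rewrite | github.com/onbao165/tofuri | tofuri.py | lookup_local
-- ===== SOURCE A (Python) =====
-- from typing import Dict, List, Optional
--
-- def lookup_local(word: str, reading_hira: Optional[str], entries: List[Dict[str, str]]) -> Optional[Dict[str, str]]:
--     exact_word = [entry for entry in entries if entry["word"] == word]
--     if exact_word:
--         if reading_hira:
--             reading_match = [entry for entry in exact_word if entry.get("reading") == reading_hira]
--             if reading_match:
--                 return reading_match[0]
--         return exact_word[0]
--     return None
-- ===== SOURCE B (Python) =====
-- from typing import Dict, List, Optional
--
-- def lookup_local(word: str, reading_hira: Optional[str], entries: List[Dict[str, str]]) -> Optional[Dict[str, str]]: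
--     # single stateful pass instead of building two filtered lists
--     first_word = None
--     for entry in entries:
--         if entry["word"] != word:
--             continue
--         if reading_hira and entry.get("reading") == reading_hira:
--             return entry
--         if first_word is None:
--             first_word = entry
--     return first_word
-- ===== Notes on version B (the rewrite author's own statement) =====
-- stated objective: simpler
-- what changed: Replaces A's two comprehension-built lists plus indexing by a single stateful pass that returns at the first word+reading match and otherwise remembers the first word match.
-- outside the precondition, e.g. on lookup_local('a', None, [{'x': 'y'}]): A raises KeyError, B raises KeyError
import Mathlib
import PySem

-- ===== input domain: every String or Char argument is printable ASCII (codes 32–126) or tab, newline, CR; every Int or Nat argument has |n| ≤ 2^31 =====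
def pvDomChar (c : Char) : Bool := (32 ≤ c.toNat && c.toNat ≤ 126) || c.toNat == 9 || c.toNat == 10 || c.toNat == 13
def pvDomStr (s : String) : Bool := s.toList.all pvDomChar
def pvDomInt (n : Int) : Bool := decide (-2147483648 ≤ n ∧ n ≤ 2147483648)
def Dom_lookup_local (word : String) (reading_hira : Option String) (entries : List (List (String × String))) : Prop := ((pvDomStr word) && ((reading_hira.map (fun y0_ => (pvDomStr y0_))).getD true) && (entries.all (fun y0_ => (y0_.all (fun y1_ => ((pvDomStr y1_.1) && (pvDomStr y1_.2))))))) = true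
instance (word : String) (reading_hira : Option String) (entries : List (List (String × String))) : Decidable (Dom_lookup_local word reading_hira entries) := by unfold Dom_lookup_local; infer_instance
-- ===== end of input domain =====

-- B replaces A's two comprehension-built lists with one stateful pass; objective: simpler.

-- shared primitive: Python dict lookup entry.get(k) on an association list (first match)
def pvDGet? (entry : List (String × String)) (k : String) : Option String :=
  (PySem.Dict.mk entry).get? k

-- Python truthiness of the Optional[str] reading_hira
def pvTruthy (rh : Option String) : Bool :=
  match rh with
  | none => false
  | some r => r ≠ ""

-- ===== PORT A =====
def lookup_local (word : String) (reading_hira : Option String) (entries : List (List (String × String))) : Option (List (String × String)) :=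
  -- exact_word = [entry for entry in entries if entry["word"] == word]
  -- (entry["word"] raises KeyError when absent; Pre_ excludes that, port reads (get "word").getD "")
  let exact_word := entries.filter (fun e => (pvDGet? e "word").getD "" == word)
  match exact_word with
  | [] => none                 -- if exact_word: … else return None
  | e :: _ =>
    if pvTruthy reading_hira then
      let reading_match := exact_word.filter (fun x => pvDGet? x "reading" == reading_hira)
      match reading_match with
      | m :: _ => some m       -- return reading_match[0]
      | [] => some e           -- return exact_word[0]
    else some e

-- ===== PORT B =====
def lookup_local_alt_loop (word : String) (reading_hira : Option String)
    (first_word : Option (List (String × String))) :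
    List (List (String × String)) → Option (List (String × String))
  | [] => first_word
  | entry :: rest =>
    if (pvDGet? entry "word").getD "" ≠ word then
      lookup_local_alt_loop word reading_hira first_word rest
    else if pvTruthy reading_hira ∧ pvDGet? entry "reading" == reading_hira then
      some entry
    else
      lookup_local_alt_loop word reading_hira
        (if first_word = none then some entry else first_word) rest

def lookup_local_alt (word : String) (reading_hira : Option String) (entries : List (List (String × String))) : Option (List (String × String)) :=
  lookup_local_alt_loop word reading_hira none entries

-- ===== PRECONDITION & SPEC =====
-- Pre_ excludes exactly the inputs where Python A raises KeyError: an entry without a "word" key.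
def Pre_lookup_local (word : String) (reading_hira : Option String) (entries : List (List (String × String))) : Prop :=
  ∀ e ∈ entries, (pvDGet? e "word").isSome = true
instance (word : String) (reading_hira : Option String) (entries : List (List (String × String))) : Decidable (Pre_lookup_local word reading_hira entries) := by unfold Pre_lookup_local; infer_instance

def pvWitness_lookup_local : String × Option String × (List (List (String × String))) :=
  ("cat", some "neko", [[("word", "cat"), ("reading", "neko")], [("word", "dog")]])

def Spec_lookup_local (word : String) (reading_hira : Option String) (entries : List (List (String × String))) (out : Option (List (String × String))) : Prop := out = lookup_local_alt word reading_hira entries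
instance (word : String) (reading_hira : Option String) (entries : List (List (String × String))) (out : Option (List (String × String))) : Decidable (Spec_lookup_local word reading_hira entries out) := by unfold Spec_lookup_local; infer_instance

-- ===== CLAIM (what is proved, stated in full; the proofs are below) =====
def Claim_equal_lookup_local : Prop := ∀ (word : String) (reading_hira : Option String) (entries : List (List (String × String))), Dom_lookup_local word reading_hira entries → Pre_lookup_local word reading_hira entries → Spec_lookup_local word reading_hira entries (lookup_local word reading_hira entries)

-- ===== LEMMAS AND PROOFS =====

-- Characterise B's loop: it returns the first word+reading match if one exists,
-- else the accumulator, else the first word match.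
theorem alt_loop_eq (word : String) (reading_hira : Option String)
    (fw : Option (List (String × String))) (l : List (List (String × String))) :
    lookup_local_alt_loop word reading_hira fw l =
      match (l.filter (fun e => (pvDGet? e "word").getD "" == word)).filter
              (fun x => pvTruthy reading_hira && (pvDGet? x "reading" == reading_hira)) with
      | m :: _ => some m
      | [] => fw.orElse (fun _ =>
          (l.filter (fun e => (pvDGet? e "word").getD "" == word)).head?) := by
  induction l generalizing fw with
  | nil => cases fw <;> simp [lookup_local_alt_loop, Option.orElse]
  | cons e rest ih =>
    by_cases hw : ((pvDGet? e "word").getD "" == word) = true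
    · by_cases hr : (pvTruthy reading_hira && (pvDGet? e "reading" == reading_hira)) = true
      · simp only [lookup_local_alt_loop, hw]
        have : ¬ ((pvDGet? e "word").getD "" ≠ word) := by
          simp at hw; simp [hw]
        rw [if_neg this]
        have hr' : pvTruthy reading_hira ∧ pvDGet? e "reading" == reading_hira := by
          simp at hr ⊢; exact hr
        rw [if_pos hr']
        simp [List.filter, hw, hr]
      · simp only [lookup_local_alt_loop, hw]
        have hne : ¬ ((pvDGet? e "word").getD "" ≠ word) := by
          simp at hw; simp [hw]
        rw [if_neg hne]
        have hr' : ¬ (pvTruthy reading_hira ∧ pvDGet? e "reading" == reading_hira) := by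
          simp at hr ⊢; intro h1; exact hr h1
        rw [if_neg hr', ih]
        simp only [List.filter, hw, hr]
        cases h : (rest.filter (fun e => (pvDGet? e "word").getD "" == word)).filter
            (fun x => pvTruthy reading_hira && (pvDGet? x "reading" == reading_hira)) with
        | cons m t => simp
        | nil =>
          cases fw <;> simp [Option.orElse]
    · simp only [lookup_local_alt_loop]
      have : ((pvDGet? e "word").getD "" ≠ word) := by
        simp at hw ⊢; exact hw
      rw [if_pos this, ih]
      simp [List.filter, hw]

-- ===== VERDICT (by name: the statement is the Claim_ definition above) =====
theorem lookup_local_spec : Claim_equal_lookup_local := by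
  intro word reading_hira entries _ _
  unfold Spec_lookup_local lookup_local lookup_local_alt
  rw [alt_loop_eq]
  cases hew : entries.filter (fun e => (pvDGet? e "word").getD "" == word) with
  | nil => simp [hew]
  | cons e rest =>
    by_cases ht : pvTruthy reading_hira = true
    · simp only [ht, Bool.true_and, if_true]
      cases hrm : (e :: rest).filter
          (fun x => pvDGet? x "reading" == reading_hira) with
      | cons m t => rfl
      | nil => rfl
    · simp only [Bool.not_eq_true] at ht
      simp only [ht, Bool.false_and, List.filter_false, if_false]; rfl
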